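/-
  jsmn_s.bin (-DJSMN_STRICT -DJSMN_PARENT_LINKS): **`jsmn_parse_string` computes `Jsmn.parseString`** (341 bytes at 100154H, 111 instructions, two
  loops, two calls). The regions are proved in S/StrEnds.lean (prologue, `pos++`, epilogue), S/StrHead.lean (the head of the outer loop), S/StrEsc.lean (the
  escape switch), S/StrHex.lean (one trip of the hex loop), S/StrQuote.lean + S/StrTok.lean (the closing quote: counting mode, the two call sites, the parent
  link); this file joins them:
    hex_loop    the inner loop by `Reach.loopOn`, the measure being `hexScan`'s remaining count (4 - i);
    str_body    one trip round the outer loop, the measure being `strScan`'s fuel;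
    str_spec    the contract `StrSpec binS n`, the model equation read off case by case.
  The two callees are used through their contracts `AllocSpec binS n`, `FillSpec binS n`.
-/
import Prog.Jsmn.S.StrEnds
import Prog.Jsmn.S.StrHex
import Prog.Jsmn.S.StrQuote

namespace X86
namespace J6
namespace S
namespace Str
open X86.User (CodeAt RegsKept Span FlagsOK Layout toNat_add_ofNat toNat_ofNat_lt' add_ofNat_add)
open Jsmn JsmnSBytes

set_option maxRecDepth 100000
set_option maxHeartbeats 4000000
set_option linter.unusedSimpArgs false
set_option linter.unusedVariables false

/-! ### The model's loops, one step at a time -/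

section Model
variable {js : List UInt8} {k q : Nat}

theorem hexScan_stop (h : more js q = false) : hexScan js (k + 1) q = some q := by simp [hexScan, h]
theorem hexScan_hex (h : more js q = true) (hx : isHex (charAt js q) = true) : hexScan js (k + 1) q = hexScan js k (u32 ((q : Int) + 1)) := by
  simp [hexScan, h, hx]
theorem hexScan_bad (h : more js q = true) (hx : isHex (charAt js q) = false) : hexScan js (k + 1) q = none := by simp [hexScan, h, hx]

theorem strScan_eoi (h : more js q = false) : strScan js (k + 1) q = some .eoi := by simp [strScan, h]

theorem strScan_quote (h : more js q = true) (hc : charAt js q = 0x22) : strScan js (k + 1) q = some (.quote q) := by simp [strScan, h, hc]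

theorem strScan_plain (h : more js q = true) (hc : charAt js q ≠ 0x22) (hb : ¬ (charAt js q = 0x5c ∧ u32 ((q : Int) + 1) < js.length)) :
    strScan js (k + 1) q = strScan js k (u32 ((q : Int) + 1)) := by
  have hb' : (charAt js q == 0x5c && decide (u32 ((q : Int) + 1) < js.length)) = false := by
    cases e : (charAt js q == 0x5c && decide (u32 ((q : Int) + 1) < js.length)) with
    | false => rfl
    | true =>
      simp only [Bool.and_eq_true, beq_iff_eq, decide_eq_true_eq] at e
      exact absurd e hb
  simp only [strScan, h, if_true, beq_iff_eq, hc, if_false, hb', Bool.false_eq_true]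

theorem strScan_esc (h : more js q = true) (hc : charAt js q = 0x5c) (hl : u32 ((q : Int) + 1) < js.length) :
    strScan js (k + 1) q =
      if isSimpleEscape (charAt js (u32 ((q : Int) + 1))) then strScan js k (u32 ((u32 ((q : Int) + 1) : Int) + 1))
      else if charAt js (u32 ((q : Int) + 1)) == 0x75 then
        match hexScan js 4 (u32 ((u32 ((q : Int) + 1) : Int) + 1)) with
        | none => some .bad
        | some h => strScan js k (u32 ((u32 ((h : Int) - 1) : Int) + 1))
      else some .bad := by
  have h22 : ((0x5c : UInt8) == 0x22) = false := by decide
  simp only [strScan, h, if_true, hc, h22, Bool.false_eq_true, if_false, beq_self_eq_true, hl, decide_true, Bool.and_self]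
  rfl

end Model

/-! ### `parseString`, case by case -/

section Model2
variable {js : List UInt8} {fuel : Nat} {p : Parser} {numTokens q : Nat}

theorem ps_bad {toks : Option Tokens} (hscan : strScan js fuel (u32 ((p.pos : Int) + 1)) = some .bad) :
    parseString Config.strictLinks js fuel p toks numTokens = some (JSMN_ERROR_INVAL, p, toks) := by
  simp [parseString, hscan]

theorem ps_eoi {toks : Option Tokens} (hscan : strScan js fuel (u32 ((p.pos : Int) + 1)) = some .eoi) :
    parseString Config.strictLinks js fuel p toks numTokens = some (JSMN_ERROR_PART, p, toks) := by
  simp [parseString, hscan]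

theorem ps_count (hscan : strScan js fuel (u32 ((p.pos : Int) + 1)) = some (.quote q)) :
    parseString Config.strictLinks js fuel p none numTokens = some (0, { p with pos := q }, none) := by
  simp [parseString, hscan]

theorem ps_nomem {ts : Tokens} (hscan : strScan js fuel (u32 ((p.pos : Int) + 1)) = some (.quote q))
    (ha : allocToken Config.strictLinks { p with pos := q } ts numTokens = none) :
    parseString Config.strictLinks js fuel p (some ts) numTokens = some (JSMN_ERROR_NOMEM, p, some ts) := by
  simp [parseString, hscan, ha]

theorem ps_ok {ts ts1 : Tokens} {i : Nat} {p1 : Parser} (hscan : strScan js fuel (u32 ((p.pos : Int) + 1)) = some (.quote q))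
    (ha : allocToken Config.strictLinks { p with pos := q } ts numTokens = some (i, p1, ts1)) :
    parseString Config.strictLinks js fuel p (some ts) numTokens =
      some (0, p1, some ((ts1.set i (fillToken (ts1.getD i default) JSMN_STRING (i32 (i32 p.pos + 1)) (i32 q))).set i
        { (ts1.set i (fillToken (ts1.getD i default) JSMN_STRING (i32 (i32 p.pos + 1)) (i32 q))).getD i default with parent := p.toksuper })) := by
  simp [parseString, hscan, ha, links_strictLinks]

/-- `jsmn_alloc_token` does not touch `toksuper`. -/
theorem alloc_toksuper {pp p1 : Parser} {ts ts1 : Tokens} {i : Nat} (ha : allocToken Config.strictLinks pp ts numTokens = some (i, p1, ts1)) :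
    p1.toksuper = pp.toksuper := by
  unfold allocToken at ha
  split at ha
  · exact absurd ha (by simp)
  · simp only [Option.some.injEq, Prod.mk.injEq] at ha
    rw [← ha.2.1]

end Model2

variable {c : SCtx} {n : User.Layout} {v0 v : User.State}

/-- The function returns what the model says: from `AtRet` with the answer `(r1, pp, tk)` that the model equation gives. -/
theorem ret_done (he : Entry c n v0) {fuel : Nat} {r r1 : Int} {p' pp : Parser} {toks' tk : Option Tokens}
    (hm : parseString Config.strictLinks c.js fuel c.p c.toks c.numTokens = some (r, p', toks')) {T : Option Tokens} (ht : c.toks = T)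
    (h1 : parseString Config.strictLinks c.js fuel c.p T c.numTokens = some (r1, pp, tk)) (ha : AtRet c n v0 v r1 pp tk) :
    Reach n v (ScanPost binS binS.useStr v0 c.ret c.pa c.tb c.numTokens c.toks r p' toks') := by
  rw [ht, h1] at hm
  simp only [Option.some.injEq, Prod.mk.injEq] at hm
  obtain ⟨rfl, rfl, rfl⟩ := hm
  exact epilogue he ha

/-- **The hex loop** (1001D7H): from `i` digits read at position `h`, with `hexScan c.js (4 - i) h = hres`: a character that is not a hex digit ends the
function with JSMN_ERROR_INVAL (`hres = none`); otherwise the loop ends at the position `hq` the model says, `pos--` is done and `pos++` (100221H) is next. -/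
theorem hex_loop (he : Entry c n v0) (hres : Option Nat) :
    ∀ j v, (∃ i h, AtHex c n v0 v i h ∧ i + j = 4 ∧ hexScan c.js j h = hres) →
      Reach n v (fun v' => (hres = none ∧ AtRet c n v0 v' JSMN_ERROR_INVAL c.p c.toks) ∨
        (∃ hq, hres = some hq ∧ At c n v0 v' 0x100221 (u32 ((hq : Int) - 1)))) := by
  refine Reach.loopOn ?_
  intro j v ⟨i, h, ha, hij, hsc⟩
  cases j with
  | zero =>
    refine (hex_exit he ha (by omega) (Or.inl (by omega))).mono fun v' h' => Or.inl (Or.inr ⟨h, ?_, h'⟩)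
    rw [← hsc]; rfl
  | succ j =>
    by_cases hh : h < c.js.length
    · refine (hex_body he ha (by omega) hh).mono fun v' h' => ?_
      rcases h' with ⟨hm, hat⟩ | ⟨hm, hx, hat⟩ | ⟨hm, hx, hat⟩
      · exact Or.inl (Or.inr ⟨h, by rw [← hsc, hexScan_stop hm], hat⟩)
      · exact Or.inr ⟨j, Nat.lt_succ_self j, i + 1, _, hat, by omega, by rw [← hsc, hexScan_hex hm hx]⟩
      · exact Or.inl (Or.inl ⟨by rw [← hsc, hexScan_bad hm hx], hat⟩)
    · refine (hex_exit he ha (by omega) (Or.inr (by omega))).mono fun v' h' => Or.inl (Or.inr ⟨h, ?_, h'⟩)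
      rw [← hsc, hexScan_stop (more_false_len (by omega))]

/-- One trip round the outer loop, at its head with `parser->pos = q` and `k` units of the model's fuel: the function returns with the model's answer,
or the head is reached again with less fuel. -/
theorem str_body (halloc : AllocSpec binS n) (hfill : FillSpec binS n) (he : Entry c n v0) {fuel : Nat} {r : Int} {p' : Parser}
    {toks' : Option Tokens} {res : StrScan} (hm : parseString Config.strictLinks c.js fuel c.p c.toks c.numTokens = some (r, p', toks'))
    (hscan : strScan c.js fuel (u32 ((c.p.pos : Int) + 1)) = some res) (k : Nat) (v : User.State)
    (hi : ∃ q, At c n v0 v 0x100228 q ∧ strScan c.js k q = some res) :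
    Reach n v (fun v' => ScanPost binS binS.useStr v0 c.ret c.pa c.tb c.numTokens c.toks r p' toks' v' ∨
      ∃ k', k' < k ∧ ∃ q, At c n v0 v' 0x100228 q ∧ strScan c.js k' q = some res) := by
  obtain ⟨q, ha, hk⟩ := hi
  cases k with
  | zero => simp [strScan] at hk
  | succ k =>
  -- the three ways out of the function, and the way back to the head
  have hPART : res = .eoi → ∀ v1, AtRet c n v0 v1 JSMN_ERROR_PART c.p c.toks → Reach n v1 (fun v' =>
      ScanPost binS binS.useStr v0 c.ret c.pa c.tb c.numTokens c.toks r p' toks' v' ∨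
      ∃ k', k' < k + 1 ∧ ∃ q, At c n v0 v' 0x100228 q ∧ strScan c.js k' q = some res) := fun hr v1 h1 =>
    (ret_done he hm rfl (ps_eoi (hr ▸ hscan)) h1).mono fun _ h => Or.inl h
  have hINVAL : res = .bad → ∀ v1, AtRet c n v0 v1 JSMN_ERROR_INVAL c.p c.toks → Reach n v1 (fun v' =>
      ScanPost binS binS.useStr v0 c.ret c.pa c.tb c.numTokens c.toks r p' toks' v' ∨
      ∃ k', k' < k + 1 ∧ ∃ q, At c n v0 v' 0x100228 q ∧ strScan c.js k' q = some res) := fun hr v1 h1 =>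
    (ret_done he hm rfl (ps_bad (hr ▸ hscan)) h1).mono fun _ h => Or.inl h
  have hNEXT : ∀ q1 : Nat, strScan c.js k (u32 ((q1 : Int) + 1)) = some res → ∀ v1, At c n v0 v1 0x100221 q1 → Reach n v1 (fun v' =>
      ScanPost binS binS.useStr v0 c.ret c.pa c.tb c.numTokens c.toks r p' toks' v' ∨
      ∃ k', k' < k + 1 ∧ ∃ q, At c n v0 v' 0x100228 q ∧ strScan c.js k' q = some res) := fun q1 hs v1 h1 =>
    (next he h1).mono fun _ h => Or.inr ⟨k, Nat.lt_succ_self k, _, h, hs⟩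
  by_cases hq : q < c.js.length
  · refine (head he ha hq).trans fun v1 h1 => ?_
    rcases h1 with ⟨hmf, hat⟩ | ⟨hmt, hc, hat⟩ | ⟨hmt, hc, hb, hat⟩ | ⟨hmt, hc, hl, hat⟩
    · -- a NUL
      rw [strScan_eoi hmf] at hk
      exact hPART (Option.some.inj hk).symm v1 hat
    · -- the closing quote
      rw [strScan_quote hmt hc] at hk
      have hres : res = .quote q := (Option.some.inj hk).symm
      subst hres
      have hcases : c.toks = none ∨ ∃ ts, c.toks = some ts := by cases c.toks <;> simp
      rcases hcases with hs | ⟨ts, hs⟩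
      · refine (quote_count he hat hs).trans fun v2 h2 => ?_
        exact (ret_done he hm hs (ps_count hscan) h2).mono fun _ h => Or.inl h
      · refine (quote_tok halloc hfill he hat hs).trans fun v2 h2 => ?_
        cases hal : allocToken Config.strictLinks { c.p with pos := q } ts c.numTokens with
        | none =>
          rw [hal] at h2
          exact (ret_done he hm hs (ps_nomem hscan hal) h2).mono fun _ h => Or.inl h
        | some x =>
          obtain ⟨i, p1, ts1⟩ := x
          rw [hal] at h2
          have hsup : p1.toksuper = c.p.toksuper := alloc_toksuper (pp := { c.p with pos := q }) hal
          simp only [hsup] at h2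
          exact (ret_done he hm hs (ps_ok hscan hal) h2).mono fun _ h => Or.inl h
    · -- an ordinary character
      rw [strScan_plain hmt hc hb] at hk
      exact hNEXT q hk v1 hat
    · -- a backslash
      rw [strScan_esc hmt hc hl] at hk
      refine (esc he hat hl).trans fun v2 h2 => ?_
      rcases h2 with ⟨hse, hat2⟩ | ⟨hse, hu, hat2⟩ | ⟨hse, hu, hat2⟩
      · rw [if_pos hse] at hk
        exact hNEXT _ hk v2 hat2
      · have hu' : (charAt c.js (u32 ((q : Int) + 1)) == 0x75) = true := by rw [hu]; rfl
        rw [if_neg (by rw [hse]; simp), if_pos hu'] at hk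
        refine (hex_loop he _ 4 v2 ⟨0, _, hat2, rfl, rfl⟩).trans fun v3 h3 => ?_
        rcases h3 with ⟨hn, hat3⟩ | ⟨hq', hsm, hat3⟩
        · rw [hn] at hk
          exact hINVAL (Option.some.inj hk).symm v3 hat3
        · rw [hsm] at hk
          exact hNEXT _ hk v3 hat3
      · have hu' : (charAt c.js (u32 ((q : Int) + 1)) == 0x75) = false := by simpa using hu
        rw [if_neg (by rw [hse]; simp), hu'] at hk
        exact hINVAL (Option.some.inj hk).symm v2 hat2
  · -- the text is exhausted
    rw [strScan_eoi (more_false_len (by omega))] at hk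
    exact (head_end he ha (by omega)).trans fun v1 h1 => hPART (Option.some.inj hk).symm v1 h1

/-- **`jsmn_parse_string` of jsmn_s.bin computes `Jsmn.parseString`.** -/
theorem str_spec_ctx (halloc : AllocSpec binS n) (hfill : FillSpec binS n) (he : Entry c n v0) {fuel : Nat} {r : Int} {p' : Parser}
    {toks' : Option Tokens} (hm : parseString Config.strictLinks c.js fuel c.p c.toks c.numTokens = some (r, p', toks')) :
    Reach n v0 (ScanPost binS binS.useStr v0 c.ret c.pa c.tb c.numTokens c.toks r p' toks') := by
  cases hscan : strScan c.js fuel (u32 ((c.p.pos : Int) + 1)) with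
  | none => simp [parseString, hscan] at hm
  | some res =>
    refine (prologue he).trans fun v hat => ?_
    exact Reach.loopOn (str_body halloc hfill he hm hscan) fuel v ⟨_, hat, hscan⟩

end Str

/-- **`jsmn_parse_string` of jsmn_s.bin computes `Jsmn.parseString`** (the contract `StrSpec binS n`, from the contracts of jsmn_alloc_token and
jsmn_fill_token). -/
theorem str_spec {n : User.Layout} (halloc : AllocSpec binS n) (hfill : FillSpec binS n) : StrSpec binS n := by
  intro v0 ret pa jsA tb js numTokens p toks fuel r p' toks' hp hr8 hm
  rw [binS_cfg] at hm
  exact Str.str_spec_ctx (c := ⟨ret, pa, jsA, tb, js, numTokens, p, toks⟩) halloc hfill ⟨hp, hr8⟩ hm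

end S
end J6
end X86

#print axioms X86.J6.S.str_spec
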